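-- pv_equiv track=rewrite | github.com/s3899475/noaa20_demodulate | decode.py | bit_slicer_detector
-- ===== SOURCE A (Python) =====
-- def bit_slicer_detector(length, fillsize):
--     bits = 0
--     by = 0
--
--     while fillsize % 8 != 0:
--         bits += 1
--         fillsize -= 1
--
--     by = length - (fillsize // 8)
--
--     if by > length or by < 0:
--         return length
--     else:
--         return by + 1
-- ===== SOURCE B (Python) =====
-- def bit_slicer_detector(length, fillsize):
--     # Decide directly from the input whether A's guard would fire:
--     # by > length  <=>  fillsize < 0;   by < 0  <=>  fillsize >= 8*(length+1).
--     if fillsize < 0 or fillsize >= 8 * (length + 1):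
--         return length
--     return length - (fillsize >> 3) + 1
-- ===== Notes on version B (the rewrite author's own statement) =====
-- stated objective: simpler
-- what changed: Instead of running A's remainder-stripping loop, computing by = length - fillsize//8 and guarding on the OUTPUT, B tests the INPUT range directly (fillsize < 0 or fillsize >= 8*(length+1) is exactly when A's guard fires) and otherwise returns length - (fillsize >> 3) + 1 via a bit shift, with no loop, no floor division and no intermediate by.
import Mathlib
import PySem

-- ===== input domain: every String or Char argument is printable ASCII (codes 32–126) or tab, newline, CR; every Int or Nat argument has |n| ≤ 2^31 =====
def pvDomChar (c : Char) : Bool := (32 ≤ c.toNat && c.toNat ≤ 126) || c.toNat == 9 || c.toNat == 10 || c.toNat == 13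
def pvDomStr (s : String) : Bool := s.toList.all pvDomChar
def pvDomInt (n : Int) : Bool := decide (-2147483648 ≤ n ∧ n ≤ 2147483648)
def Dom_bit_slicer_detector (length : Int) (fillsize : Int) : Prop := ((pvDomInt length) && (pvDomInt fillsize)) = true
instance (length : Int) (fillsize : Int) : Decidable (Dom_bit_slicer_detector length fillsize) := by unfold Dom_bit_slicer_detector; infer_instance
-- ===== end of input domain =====

-- B replaces A's loop-then-guard-on-output by a direct input-range test and a bit shift (simpler).


-- ===== PORT A =====
-- the while loop: state (bits, fillsize); runs while fillsize % 8 != 0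
def bsdLoop (bits : Int) (fillsize : Int) : Int × Int :=
  if PySem.Int.mod fillsize 8 ≠ 0 then bsdLoop (bits + 1) (fillsize - 1)
  else (bits, fillsize)
termination_by (PySem.Int.mod fillsize 8).toNat
decreasing_by
  rw [PySem.Int.mod_eq_emod_of_pos (a := fillsize) (by omega),
      PySem.Int.mod_eq_emod_of_pos (a := fillsize - 1) (by omega)] at *
  omega

def bit_slicer_detector (length : Int) (fillsize : Int) : Int :=
  let r := bsdLoop 0 fillsize
  let b := length - PySem.Int.floordiv r.2 8
  if b > length ∨ b < 0 then length else b + 1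

-- ===== PORT B =====
def bit_slicer_detector_alt (length : Int) (fillsize : Int) : Int :=
  if fillsize < 0 ∨ fillsize ≥ 8 * (length + 1) then length
  else length - (fillsize >>> (3 : Nat)) + 1

-- ===== PRECONDITION & SPEC =====
def Spec_bit_slicer_detector (length : Int) (fillsize : Int) (out : Int) : Prop := out = bit_slicer_detector_alt length fillsize
instance (length : Int) (fillsize : Int) (out : Int) : Decidable (Spec_bit_slicer_detector length fillsize out) := by unfold Spec_bit_slicer_detector; infer_instance

-- ===== CLAIM (what is proved, stated in full; the proofs are below) =====
def Claim_equal_bit_slicer_detector : Prop := ∀ (length : Int) (fillsize : Int), Dom_bit_slicer_detector length fillsize → Spec_bit_slicer_detector length fillsize (bit_slicer_detector length fillsize)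

-- ===== LEMMAS AND PROOFS =====
theorem bsdLoop_snd (bits fillsize : Int) :
    (bsdLoop bits fillsize).2 = fillsize - PySem.Int.mod fillsize 8 := by
  fun_induction bsdLoop bits fillsize with
  | case1 b f h ih =>
    rw [ih]
    rw [PySem.Int.mod_eq_emod_of_pos (a := f) (by omega),
        PySem.Int.mod_eq_emod_of_pos (a := f - 1) (by omega)] at *
    omega
  | case2 b f h =>
    simp only [ne_eq, not_not] at h
    simp only [h]
    simp

theorem floordiv_loop (f : Int) :
    PySem.Int.floordiv (f - PySem.Int.mod f 8) 8 = PySem.Int.floordiv f 8 := by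
  have h := PySem.Int.floordiv_mul_add_mod f 8
  have h8 : (0:Int) < 8 := by omega
  have hm0 := PySem.Int.mod_nonneg f h8
  have hm1 := PySem.Int.mod_lt f h8
  rw [PySem.Int.floordiv_eq_iff_of_pos (by omega)]
  constructor <;> omega

-- floor-division bracket facts used to relate A's output guard to B's input test
theorem floordiv_bracket (f : Int) :
    PySem.Int.floordiv f 8 * 8 ≤ f ∧ f < (PySem.Int.floordiv f 8 + 1) * 8 := by
  have h := PySem.Int.floordiv_mul_add_mod f 8
  have hm0 := PySem.Int.mod_nonneg f (b := 8) (by omega)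
  have hm1 := PySem.Int.mod_lt f (b := 8) (by omega)
  constructor <;> omega

theorem shiftRight_eq_floordiv (f : Int) :
    f >>> (3 : Nat) = PySem.Int.floordiv f 8 := by
  have h8 : (0:Int) < 8 := by omega
  rw [PySem.Int.floordiv_eq_ediv_of_pos h8]
  rw [Int.shiftRight_eq_div_pow]
  norm_num

-- ===== VERDICT (by name: the statement is the Claim_ definition above) =====
theorem bit_slicer_detector_spec : Claim_equal_bit_slicer_detector := by
  intro length fillsize _
  unfold Spec_bit_slicer_detector bit_slicer_detector bit_slicer_detector_alt
  simp only [bsdLoop_snd, floordiv_loop, shiftRight_eq_floordiv]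
  obtain ⟨hb1, hb2⟩ := floordiv_bracket fillsize
  split_ifs with h1 h2 <;> omega
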